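-- pv_equiv track=rewrite | github.com/RedPlato/ThicknessGaussCantor | continued_fractions_toolbox/extremal_continued_fractions.py | subshift_symmetrization
-- ===== SOURCE A (Python) =====
-- def subshift_symmetrization(forbidden_words):
--     r"""Add the transposes to the forbidden_words set.
--     Additionally, deletes forbidden words if a subword is already on the set."""
--     forbidden_words = set(forbidden_words)
--     F_T = set()
--     for w in forbidden_words:
--         F_T.add(w[::-1])
--     forbidden_words = set(sorted(forbidden_words.union(F_T)))
--     F = forbidden_words.copy()
--     for w in forbidden_words:
--         for eta in forbidden_words:
--             if w != eta and w in eta: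
--                 if eta in F:
--                     F.remove(eta)
--     return F
-- ===== SOURCE B (Python) =====
-- def subshift_symmetrization(forbidden_words):
--     """B: build the sorted closure once, then for each word test its proper
--     substrings against a hash set (no pairwise word-vs-word scan)."""
--     words = sorted(set(forbidden_words) | {w[::-1] for w in forbidden_words})
--     wordset = set(words)
--     result = set()
--     for eta in words:
--         n = len(eta)
--         if not any(j - i < n and eta[i:j] in wordset
--                    for i in range(n + 1)
--                    for j in range(i, n + 1)):
--             result.add(eta)
--     return result
-- ===== Notes on version B (the rewrite author's own statement) =====
-- stated objective: faster
-- what changed: Instead of A's pairwise scan that tests every word against every other word, B builds the sorted reverse-closure once and checks each word's proper substrings against a hash set of all words, so the quadratic word-vs-word loop disappears.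
import Mathlib
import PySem

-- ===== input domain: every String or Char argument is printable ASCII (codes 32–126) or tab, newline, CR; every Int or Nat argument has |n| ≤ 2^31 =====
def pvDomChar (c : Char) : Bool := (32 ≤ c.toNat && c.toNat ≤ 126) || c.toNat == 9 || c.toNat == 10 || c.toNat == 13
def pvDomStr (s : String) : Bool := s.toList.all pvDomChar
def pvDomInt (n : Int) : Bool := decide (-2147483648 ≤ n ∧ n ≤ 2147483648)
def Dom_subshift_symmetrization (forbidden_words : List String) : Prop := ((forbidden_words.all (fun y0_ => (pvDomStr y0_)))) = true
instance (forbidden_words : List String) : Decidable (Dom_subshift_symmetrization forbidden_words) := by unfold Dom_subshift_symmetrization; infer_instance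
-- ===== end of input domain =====

-- B replaces A's pairwise word-vs-word containment scan by testing each word's proper
-- substrings against a hash set of all words (objective: faster on many-word inputs).
-- Both Pythons return a set; equality of the ports is exact list equality because both
-- ports realise the set in the same (sorted) order.

-- w[::-1]  (shared by both sources; step -1 never raises, so .getD "" is never the default)
def pyrev (s : String) : String := (PySem.Str.slice? s none none (-1)).getD ""

-- ===== PORT A =====
def subshift_symmetrization (forbidden_words : List String) : List String :=
  let fw := PySem.Set.ofList forbidden_words
  let ft := fw.foldl (fun s w => PySem.Set.add s (pyrev w)) PySem.Set.empty
  let fw2 := PySem.Set.ofList (PySem.List.sorted (PySem.Set.union fw ft) (fun x => x) false)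
  fw2.foldl (fun F w =>
    fw2.foldl (fun F eta =>
      if w ≠ eta ∧ PySem.Str.isIn w eta = true then
        (if PySem.Set.contains F eta then PySem.Set.discard F eta else F)
      else F) F) fw2

-- ===== PORT B =====
def subshift_symmetrization_alt (forbidden_words : List String) : List String :=
  let words := PySem.List.sorted
      (PySem.Set.union (PySem.Set.ofList forbidden_words)
        (PySem.Set.ofList (forbidden_words.map pyrev))) (fun x => x) false
  let wordset := PySem.Set.ofList words
  words.foldl (fun res eta =>
    let n := PySem.Str.len eta
    if (PySem.List.pyRange 0 (n+1) 1).any (fun i =>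
        (PySem.List.pyRange i (n+1) 1).any (fun j =>
          decide (j - i < n) && PySem.Set.contains wordset (PySem.Str.slice eta (some i) (some j))))
    then res else PySem.Set.add res eta) PySem.Set.empty

-- ===== PRECONDITION & SPEC =====
def Spec_subshift_symmetrization (forbidden_words : List String) (out : List String) : Prop := out = subshift_symmetrization_alt forbidden_words
instance (forbidden_words : List String) (out : List String) : Decidable (Spec_subshift_symmetrization forbidden_words out) := by unfold Spec_subshift_symmetrization; infer_instance

-- ===== CLAIM (what is proved, stated in full; the proofs are below) =====
def Claim_equal_subshift_symmetrization : Prop := ∀ (forbidden_words : List String), Dom_subshift_symmetrization forbidden_words → Spec_subshift_symmetrization forbidden_words (subshift_symmetrization forbidden_words)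

-- ===== LEMMAS AND PROOFS =====

-- the sorted, deduplicated closure both ports filter
def wordsOf (fw : List String) : List String :=
  PySem.List.sorted
    (PySem.Set.union (PySem.Set.ofList fw) (PySem.Set.ofList (fw.map pyrev)))
    (fun x => x) false

lemma nodup_wordsOf (fw : List String) : (wordsOf fw).Nodup := by
  have h := PySem.Set.nodup_union (PySem.Set.ofList fw) (PySem.Set.ofList (fw.map pyrev))
      (PySem.Set.nodup_ofList fw)
  exact ((PySem.List.sorted_perm _ _ _).symm.nodup h)

-- A's sorted base list equals wordsOf
lemma A_base (fw : List String) :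
    PySem.Set.ofList (PySem.List.sorted
      (PySem.Set.union (PySem.Set.ofList fw)
        ((PySem.Set.ofList fw).foldl (fun s w => PySem.Set.add s (pyrev w)) PySem.Set.empty))
      (fun x => x) false) = wordsOf fw := by
  have hft : (PySem.Set.ofList fw).foldl (fun s w => PySem.Set.add s (pyrev w)) PySem.Set.empty
      = PySem.Set.ofList ((PySem.Set.ofList fw).map pyrev) := by
    rw [← PySem.Set.update_map_eq_foldl_add]
    exact PySem.Set.update_nil_left _
  have hperm : (PySem.Set.union (PySem.Set.ofList fw)
        (PySem.Set.ofList ((PySem.Set.ofList fw).map pyrev))).Perm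
      (PySem.Set.union (PySem.Set.ofList fw) (PySem.Set.ofList (fw.map pyrev))) := by
    rw [List.perm_ext_iff_of_nodup
      (PySem.Set.nodup_union _ _ (PySem.Set.nodup_ofList fw))
      (PySem.Set.nodup_union _ _ (PySem.Set.nodup_ofList fw))]
    intro a
    simp [PySem.Set.mem_union, PySem.Set.mem_ofList, List.mem_map]
  have hsort : PySem.List.sorted
      (PySem.Set.union (PySem.Set.ofList fw)
        (PySem.Set.ofList ((PySem.Set.ofList fw).map pyrev))) (fun x => x) false = wordsOf fw := by
    unfold wordsOf
    exact PySem.List.sorted_eq_sorted_of_perm _ _ _ (fun a b h => h) hperm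
  rw [hft, hsort, PySem.Set.ofList_eq_self_of_nodup _ (nodup_wordsOf fw)]

-- guarded remove = unconditional filter
lemma guard_discard (F : List String) (e : String) :
    (if PySem.Set.contains F e then PySem.Set.discard F e else F)
      = F.filter (fun y => !(y == e)) := by
  by_cases hm : e ∈ F
  · rw [if_pos ((PySem.Set.contains_iff F e).mpr hm)]; rfl
  · rw [if_neg (by simp [hm])]
    exact (List.filter_eq_self.mpr (fun y hy => by
      simp only [ne_eq, Bool.not_eq_eq_eq_not, Bool.not_true, beq_eq_false_iff_ne]
      exact fun h => hm (h ▸ hy))).symm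

-- A's inner loop over es removes from F exactly the members of es that w properly contains
lemma innerFold (w : String) (es : List String) (F : List String) :
    es.foldl (fun F eta =>
      if w ≠ eta ∧ PySem.Str.isIn w eta = true then
        (if PySem.Set.contains F eta then PySem.Set.discard F eta else F)
      else F) F
    = F.filter (fun eta => decide ¬(eta ∈ es ∧ w ≠ eta ∧ PySem.Str.isIn w eta = true)) := by
  induction es generalizing F with
  | nil => simp
  | cons e es ih =>
    simp only [List.foldl_cons]
    by_cases hc : w ≠ e ∧ PySem.Str.isIn w e = true
    · rw [if_pos hc, guard_discard, ih, List.filter_filter]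
      apply List.filter_congr
      intro y hy
      have hc' : PySem.Chars.isIn w.toList e.toList = true := by simpa using hc.2
      by_cases hye : y = e
      · subst hye; simp [hc.1, hc', List.mem_cons]
      · simp [hye, List.mem_cons]
    · rw [if_neg hc, ih]
      apply List.filter_congr
      intro y hy
      by_cases hye : y = e
      · subst hye
        rcases not_and_or.mp hc with h | h
        · simp [not_not.mp h]
        · simp only [Bool.not_eq_true] at h
          simp [List.mem_cons, show PySem.Chars.isIn w.toList y.toList = false by simpa using h]
      · simp [hye, List.mem_cons]

-- A's outer loop filters by "some w in ws properly contains eta (and eta ∈ L)"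
lemma outerFold (ws L F : List String) :
    ws.foldl (fun F w =>
      L.foldl (fun F eta =>
        if w ≠ eta ∧ PySem.Str.isIn w eta = true then
          (if PySem.Set.contains F eta then PySem.Set.discard F eta else F)
        else F) F) F
    = F.filter (fun eta =>
        decide ¬ ∃ w, w ∈ ws ∧ eta ∈ L ∧ w ≠ eta ∧ PySem.Str.isIn w eta = true) := by
  induction ws generalizing F with
  | nil =>
    simp only [List.foldl_nil]
    symm
    apply List.filter_eq_self.mpr
    intro y hy
    exact decide_eq_true (by rintro ⟨w, hw, -⟩; simp at hw)
  | cons v ws ih =>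
    simp only [List.foldl_cons]
    rw [innerFold, ih, List.filter_filter]
    apply List.filter_congr
    intro y hy
    rw [← Bool.decide_and, decide_eq_decide]
    simp only [List.mem_cons]
    constructor
    · rintro ⟨h1, h2⟩ ⟨w, hw | hw, hrest⟩
      · exact h2 ⟨hrest.1, hw ▸ hrest.2.1, hw ▸ hrest.2.2⟩
      · exact h1 ⟨w, hw, hrest⟩
    · intro h
      exact ⟨fun ⟨w, hw, hr⟩ => h ⟨w, Or.inr hw, hr⟩,
             fun ⟨hm, hr⟩ => h ⟨v, Or.inl rfl, hm, hr⟩⟩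

lemma A_eq_filter (fw : List String) :
    subshift_symmetrization fw
    = (wordsOf fw).filter (fun eta =>
        decide ¬ ∃ w, w ∈ wordsOf fw ∧ w ≠ eta ∧ PySem.Str.isIn w eta = true) := by
  show (PySem.Set.ofList (PySem.List.sorted
      (PySem.Set.union (PySem.Set.ofList fw)
        ((PySem.Set.ofList fw).foldl (fun s w => PySem.Set.add s (pyrev w)) PySem.Set.empty))
      (fun x => x) false)).foldl _ _ = _
  rw [A_base, outerFold]
  apply List.filter_congr
  intro y hy
  simp only [decide_eq_decide]
  constructor
  · intro h ⟨w, hw, hr⟩; exact h ⟨w, hw, hy, hr⟩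
  · intro h ⟨w, hw, _, hr⟩; exact h ⟨w, hw, hr⟩

-- B's loop with a set-accumulator is a filter (elements arrive fresh: es is Nodup)
lemma addFold (q : String → Bool) (es : List String) (res : List String)
    (hnd : es.Nodup) (hdisj : ∀ y ∈ res, y ∉ es) :
    es.foldl (fun res eta => if q eta then res else PySem.Set.add res eta) res
    = res ++ es.filter (fun eta => !q eta) := by
  induction es generalizing res with
  | nil => simp
  | cons e es ih =>
    simp only [List.foldl_cons]
    by_cases hq : q e
    · rw [if_pos hq]
      rw [ih _ (List.nodup_cons.mp hnd).2 (fun y hy => fun hmem => hdisj y hy (List.mem_cons_of_mem _ hmem))]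
      simp [hq]
    · rw [if_neg hq]
      have hne : e ∉ res := fun h => hdisj e h (List.mem_cons_self)
      rw [PySem.Set.add_of_not_mem hne]
      rw [ih _ (List.nodup_cons.mp hnd).2 (fun y hy => by
        rcases List.mem_append.mp hy with h | h
        · exact fun hmem => hdisj y h (List.mem_cons_of_mem _ hmem)
        · simp only [List.mem_singleton] at h
          exact h ▸ (List.nodup_cons.mp hnd).1)]
      simp [hq]

-- B's drop test = "the closure properly contains a word of eta"
lemma cond_iff (L : List String) (eta : String) :
    ((PySem.List.pyRange 0 (PySem.Str.len eta + 1) 1).any (fun i =>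
        (PySem.List.pyRange i (PySem.Str.len eta + 1) 1).any (fun j =>
          decide (j - i < PySem.Str.len eta) && PySem.Set.contains L (PySem.Str.slice eta (some i) (some j)))) = true)
    ↔ (∃ w, w ∈ L ∧ w ≠ eta ∧ PySem.Str.isIn w eta = true) := by
  simp only [List.any_eq_true, Bool.and_eq_true, decide_eq_true_eq, PySem.Set.contains_iff,
    PySem.List.mem_pyRange_one, PySem.Str.len_eq]
  constructor
  · rintro ⟨i, ⟨hi0, _⟩, j, ⟨hij, hj⟩, hlt, hmem⟩
    have hi : i = ((i.toNat : Nat) : Int) := (Int.toNat_of_nonneg hi0).symm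
    have hj' : j = ((j.toNat : Nat) : Int) := (Int.toNat_of_nonneg (le_trans hi0 hij)).symm
    have htl : (PySem.Str.slice eta (some i) (some j)).toList
        = (eta.toList.drop i.toNat).take (j.toNat - i.toNat) := by
      rw [PySem.Str.toList_slice, PySem.Chars.slice,
        PySem.List.slice_toNat _ hi0 (le_trans hi0 hij)]
    refine ⟨PySem.Str.slice eta (some i) (some j), hmem, ?_, ?_⟩
    · intro heq
      have hlen := congrArg (fun l => l.length) (congrArg String.toList heq)
      simp only [htl, List.length_take, List.length_drop] at hlen
      omega
    · rw [PySem.Str.isIn_iff_infix, htl]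
      exact ((List.take_prefix _ _).isInfix).trans ((List.drop_suffix _ _).isInfix)
  · rintro ⟨w, hw, hne, hin⟩
    rw [PySem.Str.isIn_iff_infix] at hin
    obtain ⟨s, t, hst⟩ := hin
    have hlen : w.toList.length < eta.toList.length := by
      have hle : w.toList.length ≤ eta.toList.length := by
        have : w.toList <:+: eta.toList := ⟨s, t, hst⟩
        exact this.length_le
      rcases lt_or_eq_of_le hle with h | h
      · exact h
      · exfalso
        have : w.toList = eta.toList := List.IsInfix.eq_of_length ⟨s, t, hst⟩ h
        exact hne (by rw [← String.ofList_toList (s := w), this, String.ofList_toList])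
    have hsum : s.length + w.toList.length + t.length = eta.toList.length := by
      rw [← hst]; simp only [List.length_append]
    have htl : (PySem.Str.slice eta (some (s.length : Int))
        (some ((s.length + w.toList.length : Nat) : Int))).toList = w.toList := by
      rw [PySem.Str.toList_slice, PySem.Chars.slice, PySem.List.slice_natCast, ← hst]
      rw [List.append_assoc, List.drop_left]
      have h2 : s.length + w.toList.length - s.length = w.toList.length := by omega
      rw [h2, List.take_left]
    have heq : PySem.Str.slice eta (some (s.length : Int))
        (some ((s.length + w.toList.length : Nat) : Int)) = w := by
      have := congrArg String.ofList htl
      rwa [String.ofList_toList, String.ofList_toList] at this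
    have hmem' : PySem.Str.slice eta (some (s.length : Int))
        (some ((s.length + w.toList.length : Nat) : Int)) ∈ L := by rw [heq]; exact hw
    exact ⟨(s.length : Int), ⟨by positivity, by omega⟩,
           ((s.length + w.toList.length : Nat) : Int),
           ⟨by push_cast; omega, by push_cast; omega⟩, by omega, hmem'⟩

lemma B_eq_filter (fw : List String) :
    subshift_symmetrization_alt fw
    = (wordsOf fw).filter (fun eta =>
        decide ¬ ∃ w, w ∈ wordsOf fw ∧ w ≠ eta ∧ PySem.Str.isIn w eta = true) := by
  show (wordsOf fw).foldl (fun res eta =>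
      if (PySem.List.pyRange 0 (PySem.Str.len eta + 1) 1).any (fun i =>
          (PySem.List.pyRange i (PySem.Str.len eta + 1) 1).any (fun j =>
            decide (j - i < PySem.Str.len eta) &&
              PySem.Set.contains (PySem.Set.ofList (wordsOf fw)) (PySem.Str.slice eta (some i) (some j))))
      then res else PySem.Set.add res eta) PySem.Set.empty = _
  rw [PySem.Set.ofList_eq_self_of_nodup _ (nodup_wordsOf fw)]
  rw [addFold _ _ _ (nodup_wordsOf fw) (by simp [PySem.Set.empty])]
  simp only [PySem.Set.empty, List.nil_append]
  apply List.filter_congr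
  intro y hy
  beta_reduce
  have hcd := cond_iff (wordsOf fw) y
  by_cases h : ∃ w, w ∈ wordsOf fw ∧ w ≠ y ∧ PySem.Str.isIn w y = true
  · rw [hcd.mpr h, Bool.not_true]
    symm
    rw [decide_eq_false_iff_not]
    exact not_not.mpr h
  · have hb : ((PySem.List.pyRange 0 (PySem.Str.len y + 1) 1).any (fun i =>
        (PySem.List.pyRange i (PySem.Str.len y + 1) 1).any (fun j =>
          decide (j - i < PySem.Str.len y) && PySem.Set.contains (wordsOf fw) (PySem.Str.slice y (some i) (some j))))) = false := by
      cases hx : ((PySem.List.pyRange 0 (PySem.Str.len y + 1) 1).any (fun i =>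
        (PySem.List.pyRange i (PySem.Str.len y + 1) 1).any (fun j =>
          decide (j - i < PySem.Str.len y) && PySem.Set.contains (wordsOf fw) (PySem.Str.slice y (some i) (some j))))) with
      | false => rfl
      | true => exact absurd (hcd.mp hx) h
    rw [hb, Bool.not_false]
    exact (decide_eq_true h).symm

-- ===== VERDICT (by name: the statement is the Claim_ definition above) =====
theorem subshift_symmetrization_spec : Claim_equal_subshift_symmetrization := by
  intro fw _
  unfold Spec_subshift_symmetrization
  rw [A_eq_filter, B_eq_filter]
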